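-- pv_equiv track=rewrite | github.com/mike-fang/imprecise_optical_neural_network | optical_nn.py | perm_full
-- ===== SOURCE A (Python) =====
-- def perm_full(D, stage='A', complex='True'):
--     perm = list(range(D))
--     if stage=='A':
--         for i in range(D//2):
--             perm[2*i], perm[2*i+1] = perm[2*i+1], perm[2*i]
--     else:
--         for i in range((D-1)//2):
--             perm[2*i+1], perm[2*i+2] = perm[2*i+2], perm[2*i+1]
--
--     return perm
-- ===== SOURCE B (Python) =====
-- def perm_full(D, stage='A', complex='True'):
--     # Build the permutation directly: each index's image is computed in closed
--     # form instead of initializing the identity and swapping pairs in place.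
--     if stage == 'A':
--         lim = 2 * (D // 2)
--         return [i + 1 - 2 * (i % 2) if i < lim else i for i in range(D)]
--     lim = 2 * ((D - 1) // 2)
--     return [i + 2 * (i % 2) - 1 if 1 <= i <= lim else i for i in range(D)]
-- ===== Notes on version B (the rewrite author's own statement) =====
-- stated objective: simpler
-- what changed: Replaces the identity-then-swap-in-place loop by a single comprehension that computes each index's image in closed form (parity arithmetic within the paired region).
import Mathlib
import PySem

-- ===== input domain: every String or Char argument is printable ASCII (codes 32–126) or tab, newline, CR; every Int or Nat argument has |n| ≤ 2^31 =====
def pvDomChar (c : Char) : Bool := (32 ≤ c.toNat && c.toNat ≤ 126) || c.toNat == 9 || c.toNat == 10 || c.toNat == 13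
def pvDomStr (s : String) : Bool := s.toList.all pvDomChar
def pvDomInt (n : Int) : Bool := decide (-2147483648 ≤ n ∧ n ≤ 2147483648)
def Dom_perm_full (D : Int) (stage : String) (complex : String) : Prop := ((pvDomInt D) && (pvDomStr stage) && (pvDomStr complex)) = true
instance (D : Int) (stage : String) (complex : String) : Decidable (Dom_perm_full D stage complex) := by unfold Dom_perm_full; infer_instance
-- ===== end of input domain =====

-- B builds the permutation by a closed-form comprehension instead of A's identity-then-swap-in-place loop; same cost, simpler.

-- ===== PORT A =====
-- swap indices in A's loops are always in range, so pyGetD/pySetD are exact here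
def perm_full (D : Int) (stage : String) (complex : String) : List Int :=
  let perm := PySem.List.pyRange 0 D 1
  if stage == "A" then
    (PySem.List.pyRange 0 (PySem.Int.floordiv D 2) 1).foldl
      (fun p i =>
        let a := PySem.List.pyGetD p (2*i+1) 0
        let b := PySem.List.pyGetD p (2*i) 0
        PySem.List.pySetD (PySem.List.pySetD p (2*i) a) (2*i+1) b) perm
  else
    (PySem.List.pyRange 0 (PySem.Int.floordiv (D-1) 2) 1).foldl
      (fun p i =>
        let a := PySem.List.pyGetD p (2*i+2) 0
        let b := PySem.List.pyGetD p (2*i+1) 0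
        PySem.List.pySetD (PySem.List.pySetD p (2*i+1) a) (2*i+2) b) perm

-- ===== PORT B =====
def perm_full_alt (D : Int) (stage : String) (complex : String) : List Int :=
  if stage == "A" then
    (PySem.List.pyRange 0 D 1).map (fun i =>
      if i < 2 * PySem.Int.floordiv D 2 then i + 1 - 2 * PySem.Int.mod i 2 else i)
  else
    (PySem.List.pyRange 0 D 1).map (fun i =>
      if 1 ≤ i ∧ i ≤ 2 * PySem.Int.floordiv (D-1) 2 then i + 2 * PySem.Int.mod i 2 - 1 else i)

-- ===== PRECONDITION & SPEC =====
def Spec_perm_full (D : Int) (stage : String) (complex : String) (out : List Int) : Prop := out = perm_full_alt D stage complex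
instance (D : Int) (stage : String) (complex : String) (out : List Int) : Decidable (Spec_perm_full D stage complex out) := by unfold Spec_perm_full; infer_instance

-- ===== CLAIM (what is proved, stated in full; the proofs are below) =====
def Claim_equal_perm_full : Prop := ∀ (D : Int) (stage : String) (complex : String), Dom_perm_full D stage complex → Spec_perm_full D stage complex (perm_full D stage complex)

-- ===== LEMMAS AND PROOFS =====

-- a map whose function fixes every element of the list is the identity
theorem pv_map_fix {f : Int → Int} {l : List Int} (h : ∀ i ∈ l, f i = i) : l.map f = l := by
  rw [List.map_congr_left (g := id) (by simpa using h), List.map_id]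

-- After k iterations of stage-A's loop, the first 2k entries of the identity are pair-swapped.
theorem loopA (D : Int) (k : Nat) (hk : 2 * (k : Int) ≤ D) :
    (PySem.List.pyRange 0 (k : Int) 1).foldl
      (fun p i =>
        let a := PySem.List.pyGetD p (2*i+1) 0
        let b := PySem.List.pyGetD p (2*i) 0
        PySem.List.pySetD (PySem.List.pySetD p (2*i) a) (2*i+1) b)
      (PySem.List.pyRange 0 D 1)
    = (PySem.List.pyRange 0 D 1).map (fun i =>
        if i < 2 * (k : Int) then i + 1 - 2 * PySem.Int.mod i 2 else i) := by
  induction k with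
  | zero =>
    rw [show PySem.List.pyRange 0 ((0:Nat):Int) 1 = [] from PySem.List.pyRange_one_eq_nil (by norm_num)]
    simp only [List.foldl_nil]
    symm
    apply pv_map_fix
    intro i hi
    rw [PySem.List.mem_pyRange_one] at hi
    rw [if_neg (by omega)]
  | succ k ih =>
    have hk' : 2 * (k : Int) ≤ D := by push_cast at hk ⊢; omega
    have h2k : (0:Int) ≤ 2*(k:Int) := by positivity
    rw [show ((k+1 : Nat) : Int) = (k : Int) + 1 by push_cast; ring,
        PySem.List.pyRange_one_succ_right (by positivity), List.foldl_append, ih hk']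
    simp only [List.foldl_cons, List.foldl_nil]
    have hlt1 : 2*(k:Int)+1 < D := by push_cast at hk; omega
    have hget : ∀ (j : Int), 0 ≤ j → j < D → ¬ (j < 2*(k:Int)) →
        PySem.List.pyGetD ((PySem.List.pyRange 0 D 1).map (fun i =>
          if i < 2 * (k : Int) then i + 1 - 2 * PySem.Int.mod i 2 else i)) j 0 = j := by
      intro j h0 hD hnot
      rw [PySem.List.pyGetD_map_pyRange_of_nonneg _ _ _ _ h0 hD]
      simp [if_neg hnot]
    rw [hget (2*(k:Int)+1) (by omega) (by omega) (by omega),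
        hget (2*(k:Int)) (by omega) (by omega) (by omega)]
    rw [PySem.List.pySetD_of_nonneg _ _ (show (0:Int) ≤ 2*(k:Int)+1 by omega),
        PySem.List.pySetD_of_nonneg _ _ (show (0:Int) ≤ 2*(k:Int) by omega)]
    apply List.ext_getElem
    · simp [PySem.List.length_pyRange_one]
    · intro n h1 h2
      simp only [List.getElem_set, List.getElem_map, PySem.List.getElem_pyRange_one, zero_add]
      simp only [List.length_set, List.length_map, PySem.List.length_pyRange_one] at h1 h2
      have hn : (n : Int) < D := by omega
      have e1 : ((2*(k:Int)+1).toNat = n) ↔ ((n:Int) = 2*(k:Int)+1) := by omega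
      have e2 : ((2*(k:Int)).toNat = n) ↔ ((n:Int) = 2*(k:Int)) := by omega
      simp only [show ∀ a : Int, PySem.Int.mod a 2 = a % 2 from fun a => PySem.Int.mod_eq_emod_of_pos (by norm_num)]
      by_cases c1 : (n:Int) = 2*(k:Int)+1
      · rw [if_pos (e1.mpr c1)]
        rw [if_pos (by omega)]
        omega
      · rw [if_neg (fun h => c1 (e1.mp h))]
        by_cases c2 : (n:Int) = 2*(k:Int)
        · rw [if_pos (e2.mpr c2), if_pos (by omega)]
          omega
        · rw [if_neg (fun h => c2 (e2.mp h))]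
          by_cases c3 : ((n:Int)) < 2*(k:Int)
          · rw [if_pos c3, if_pos (by omega)]
          · rw [if_neg c3, if_neg (by omega)]

-- After k iterations of stage-B's loop, entries 1..2k of the identity are pair-swapped.
theorem loopB (D : Int) (k : Nat) (hk : 2 * (k : Int) ≤ D - 1) :
    (PySem.List.pyRange 0 (k : Int) 1).foldl
      (fun p i =>
        let a := PySem.List.pyGetD p (2*i+2) 0
        let b := PySem.List.pyGetD p (2*i+1) 0
        PySem.List.pySetD (PySem.List.pySetD p (2*i+1) a) (2*i+2) b)
      (PySem.List.pyRange 0 D 1)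
    = (PySem.List.pyRange 0 D 1).map (fun i =>
        if 1 ≤ i ∧ i ≤ 2 * (k : Int) then i + 2 * PySem.Int.mod i 2 - 1 else i) := by
  induction k with
  | zero =>
    rw [show PySem.List.pyRange 0 ((0:Nat):Int) 1 = [] from PySem.List.pyRange_one_eq_nil (by norm_num)]
    simp only [List.foldl_nil]
    symm
    apply pv_map_fix
    intro i hi
    rw [PySem.List.mem_pyRange_one] at hi
    rw [if_neg (by omega)]
  | succ k ih =>
    have hk' : 2 * (k : Int) ≤ D - 1 := by push_cast at hk ⊢; omega
    rw [show ((k+1 : Nat) : Int) = (k : Int) + 1 by push_cast; ring,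
        PySem.List.pyRange_one_succ_right (by positivity), List.foldl_append, ih hk']
    simp only [List.foldl_cons, List.foldl_nil]
    have hget : ∀ (j : Int), 0 ≤ j → j < D → ¬ (1 ≤ j ∧ j ≤ 2*(k:Int)) →
        PySem.List.pyGetD ((PySem.List.pyRange 0 D 1).map (fun i =>
          if 1 ≤ i ∧ i ≤ 2 * (k : Int) then i + 2 * PySem.Int.mod i 2 - 1 else i)) j 0 = j := by
      intro j h0 hD hnot
      rw [PySem.List.pyGetD_map_pyRange_of_nonneg _ _ _ _ h0 hD]
      simp [if_neg hnot]
    have hb : 2*(k:Int)+2 < D + 1 := by push_cast at hk; omega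
    rw [hget (2*(k:Int)+2) (by omega) (by omega) (by omega),
        hget (2*(k:Int)+1) (by omega) (by omega) (by omega)]
    rw [PySem.List.pySetD_of_nonneg _ _ (show (0:Int) ≤ 2*(k:Int)+2 by omega),
        PySem.List.pySetD_of_nonneg _ _ (show (0:Int) ≤ 2*(k:Int)+1 by omega)]
    apply List.ext_getElem
    · simp [PySem.List.length_pyRange_one]
    · intro n h1 h2
      simp only [List.getElem_set, List.getElem_map, PySem.List.getElem_pyRange_one, zero_add]
      simp only [List.length_set, List.length_map, PySem.List.length_pyRange_one] at h1 h2
      have hn : (n : Int) < D := by omega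
      have e1 : ((2*(k:Int)+2).toNat = n) ↔ ((n:Int) = 2*(k:Int)+2) := by omega
      have e2 : ((2*(k:Int)+1).toNat = n) ↔ ((n:Int) = 2*(k:Int)+1) := by omega
      simp only [show ∀ a : Int, PySem.Int.mod a 2 = a % 2 from fun a => PySem.Int.mod_eq_emod_of_pos (by norm_num)]
      by_cases c1 : (n:Int) = 2*(k:Int)+2
      · rw [if_pos (e1.mpr c1), if_pos (by omega)]
        omega
      · rw [if_neg (fun h => c1 (e1.mp h))]
        by_cases c2 : (n:Int) = 2*(k:Int)+1
        · rw [if_pos (e2.mpr c2), if_pos (by omega)]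
          omega
        · rw [if_neg (fun h => c2 (e2.mp h))]
          by_cases c3 : 1 ≤ (n:Int) ∧ (n:Int) ≤ 2*(k:Int)
          · rw [if_pos c3, if_pos (by omega)]
          · rw [if_neg c3, if_neg (by omega)]

-- ===== VERDICT (by name: the statement is the Claim_ definition above) =====
theorem perm_full_spec : Claim_equal_perm_full := by
  intro D stage complex _
  unfold Spec_perm_full perm_full perm_full_alt
  by_cases hs : (stage == "A") = true
  · simp only [if_pos hs]
    by_cases hD : D ≤ 0
    · have hfd : PySem.Int.floordiv D 2 ≤ 0 := by
        have h := PySem.Int.floordiv_mul_add_mod D 2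
        have hm : 0 ≤ PySem.Int.mod D 2 ∧ PySem.Int.mod D 2 < 2 := by
          rw [PySem.Int.mod_eq_emod_of_pos (by norm_num)]; omega
        omega
      rw [show PySem.List.pyRange 0 (PySem.Int.floordiv D 2) 1 = [] from
            PySem.List.pyRange_one_eq_nil hfd,
          show PySem.List.pyRange 0 D 1 = [] from PySem.List.pyRange_one_eq_nil hD]
      simp
    · have hfd : PySem.Int.floordiv D 2 = D / 2 := PySem.Int.floordiv_eq_ediv_of_pos (by norm_num)
      have hk : (((D / 2).toNat : Int)) = D / 2 := by omega
      rw [hfd, ← hk]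
      exact loopA D (D/2).toNat (by omega)
  · simp only [if_neg hs]
    have hfd : PySem.Int.floordiv (D-1) 2 = (D-1) / 2 := PySem.Int.floordiv_eq_ediv_of_pos (by norm_num)
    by_cases hD : D - 1 ≤ 0
    · rw [show PySem.List.pyRange 0 (PySem.Int.floordiv (D-1) 2) 1 = [] from
            PySem.List.pyRange_one_eq_nil (by rw [hfd]; omega)]
      simp only [List.foldl_nil]
      symm
      apply pv_map_fix
      intro i hi
      rw [PySem.List.mem_pyRange_one] at hi
      rw [if_neg (by rw [hfd]; omega)]
    · have hk : ((((D-1) / 2).toNat : Int)) = (D-1) / 2 := by omega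
      rw [hfd, ← hk]
      exact loopB D ((D-1)/2).toNat (by omega)
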